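-- pv_equiv track=rewrite | github.com/dipanka-500/medical | mediscan_v70_sota_production/mediscan_v70/core/routing/intelligent_router.py | _apply_query_routing
-- ===== SOURCE A (Python) =====
-- def _apply_query_routing(
--     route: dict[str, list[str]], query: str
-- ) -> dict[str, list[str]]:
--     """Adjust routing based on query intent."""
--     q = query.lower()
--
--     # Report generation → emphasize reasoning models
--     if any(w in q for w in ["report", "generate report", "structured", "impression"]):
--         if "medix_r1_30b" not in route["reasoner"]:
--             route["reasoner"].insert(0, "medix_r1_30b")
--
--     # Differential diagnosis → heavier reasoning needed
--     if any(w in q for w in ["differential", "diagnos", "classify"]):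
--         if "medix_r1_8b" not in route["reasoner"]:
--             route["reasoner"].append("medix_r1_8b")
--
--     # Comparison / temporal → ensure multi-image capable models
--     if any(w in q for w in ["compare", "prior", "change", "progression"]):
--         if "hulu_med_7b" not in route["primary"]:
--             route["primary"].append("hulu_med_7b")
--
--     return route
-- ===== SOURCE B (Python) =====
-- def _apply_query_routing(
--     route: dict[str, list[str]], query: str
-- ) -> dict[str, list[str]]:
--     """Adjust routing based on query intent.
--
--     Pure rebuild: classify the query into wanted additions once, then produce a
--     NEW dict by mapping each entry through a per-key adjustment function
--     (the input dict is not mutated; the return value matches A's)."""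
--     q = query.lower()
--
--     def hit(words):
--         return any(w in q for w in words)
--
--     want_30b = hit(["report", "generate report", "structured", "impression"])
--     want_8b = hit(["differential", "diagnos", "classify"])
--     want_hulu = hit(["compare", "prior", "change", "progression"])
--
--     def adjusted(key, models):
--         if key == "reasoner":
--             front = ["medix_r1_30b"] if want_30b and "medix_r1_30b" not in models else []
--             back = ["medix_r1_8b"] if want_8b and "medix_r1_8b" not in models else []
--             return front + models + back
--         if key == "primary":
--             back = ["hulu_med_7b"] if want_hulu and "hulu_med_7b" not in models else []
--             return models + back
--         return models
--
--     return {k: adjusted(k, v) for k, v in route.items()}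
-- ===== Notes on version B (the rewrite author's own statement) =====
-- stated objective: idiomatic
-- what changed: A conditionally mutates the route's lists in place (three lookup-and-insert/append blocks on the shared dict); B is a pure rebuild: it classifies the query once into three wanted-addition flags and maps every route entry through one per-key adjustment function, returning a new dict and never mutating the argument.
import Mathlib
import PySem

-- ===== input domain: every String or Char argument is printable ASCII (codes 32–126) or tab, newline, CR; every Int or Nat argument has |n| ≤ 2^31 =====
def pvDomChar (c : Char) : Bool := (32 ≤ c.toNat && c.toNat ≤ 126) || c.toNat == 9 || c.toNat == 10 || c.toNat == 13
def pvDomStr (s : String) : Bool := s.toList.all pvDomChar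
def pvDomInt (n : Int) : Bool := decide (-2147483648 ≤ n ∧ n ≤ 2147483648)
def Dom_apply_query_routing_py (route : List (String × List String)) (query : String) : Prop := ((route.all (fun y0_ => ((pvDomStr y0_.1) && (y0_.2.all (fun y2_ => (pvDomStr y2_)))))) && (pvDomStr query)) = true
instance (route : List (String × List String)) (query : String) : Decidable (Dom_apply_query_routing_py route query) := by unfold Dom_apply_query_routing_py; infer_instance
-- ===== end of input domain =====

-- B replaces A's sequence of in-place conditional mutations (dict lookups + insert/append)
-- by a pure rebuild: classify the query once into wanted additions, then map every route
-- entry through one per-key adjustment function, producing a NEW dict (same return value;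
-- A mutates its argument in place while B does not — the equivalence is about the return value).

-- ===== PORT A =====
-- A-side helpers: the three sequential if-blocks of A, one stage each (the `none` branch
-- of each lookup is where the Python raises KeyError; those inputs are excluded by Pre_).
def pvStage1 (q : String) (d : PySem.Dict String (List String)) : PySem.Dict String (List String) :=
  if ["report", "generate report", "structured", "impression"].any (fun w => PySem.Str.isIn w q) then
    match d.get? "reasoner" with
    | some l => if l.contains "medix_r1_30b" then d
                else d.insert "reasoner" (PySem.List.insert l 0 "medix_r1_30b")
    | none => d
  else d

def pvStage2 (q : String) (d : PySem.Dict String (List String)) : PySem.Dict String (List String) :=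
  if ["differential", "diagnos", "classify"].any (fun w => PySem.Str.isIn w q) then
    match d.get? "reasoner" with
    | some l => if l.contains "medix_r1_8b" then d
                else d.insert "reasoner" (l ++ ["medix_r1_8b"])
    | none => d
  else d

def pvStage3 (q : String) (d : PySem.Dict String (List String)) : PySem.Dict String (List String) :=
  if ["compare", "prior", "change", "progression"].any (fun w => PySem.Str.isIn w q) then
    match d.get? "primary" with
    | some l => if l.contains "hulu_med_7b" then d
                else d.insert "primary" (l ++ ["hulu_med_7b"])
    | none => d
  else d

def apply_query_routing_py (route : List (String × List String)) (query : String) : List (String × List String) :=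
  let q := PySem.Str.lower query
  (pvStage3 q (pvStage2 q (pvStage1 q (PySem.Dict.mk route)))).items

-- ===== PORT B =====
-- B-side helper: Source B's `adjusted(key, models)` closure, with the three match flags as arguments.
def pvAdjusted (want30b want8b wantHulu : Bool) (key : String) (models : List String) : List String :=
  if key == "reasoner" then
    (if want30b && !(models.contains "medix_r1_30b") then ["medix_r1_30b"] else [])
      ++ models
      ++ (if want8b && !(models.contains "medix_r1_8b") then ["medix_r1_8b"] else [])
  else if key == "primary" then
    models ++ (if wantHulu && !(models.contains "hulu_med_7b") then ["hulu_med_7b"] else [])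
  else models

def apply_query_routing_py_alt (route : List (String × List String)) (query : String) : List (String × List String) :=
  let q := PySem.Str.lower query
  let want30b := ["report", "generate report", "structured", "impression"].any (fun w => PySem.Str.isIn w q)
  let want8b := ["differential", "diagnos", "classify"].any (fun w => PySem.Str.isIn w q)
  let wantHulu := ["compare", "prior", "change", "progression"].any (fun w => PySem.Str.isIn w q)
  (PySem.Dict.mk route).items.map (fun p => (p.1, pvAdjusted want30b want8b wantHulu p.1 p.2))

-- ===== PRECONDITION & SPEC =====
-- Pre_ excludes (a) assoc lists with duplicate keys, which do not model any Python dict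
-- (route is a dict, so its keys are distinct), and (b) exactly the inputs where A raises
-- KeyError: a reasoner-rule keyword matches but "reasoner" is not a key of route, or a
-- comparison keyword matches but "primary" is not.
def Pre_apply_query_routing_py (route : List (String × List String)) (query : String) : Prop :=
  (route.map Prod.fst).Nodup ∧
  ((["report", "generate report", "structured", "impression", "differential", "diagnos", "classify"].any
      (fun w => PySem.Str.isIn w (PySem.Str.lower query))) = true → "reasoner" ∈ route.map Prod.fst) ∧
  ((["compare", "prior", "change", "progression"].any
      (fun w => PySem.Str.isIn w (PySem.Str.lower query))) = true → "primary" ∈ route.map Prod.fst)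
instance (route : List (String × List String)) (query : String) : Decidable (Pre_apply_query_routing_py route query) := by unfold Pre_apply_query_routing_py; infer_instance

def pvWitness_apply_query_routing_py : (List (String × List String)) × String :=
  ([("reasoner", ["m"]), ("primary", [])], "Compare with prior report")

def Spec_apply_query_routing_py (route : List (String × List String)) (query : String) (out : List (String × List String)) : Prop := out = apply_query_routing_py_alt route query
instance (route : List (String × List String)) (query : String) (out : List (String × List String)) : Decidable (Spec_apply_query_routing_py route query out) := by unfold Spec_apply_query_routing_py; infer_instance

-- ===== CLAIM (what is proved, stated in full; the proofs are below) =====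
def Claim_equal_apply_query_routing_py : Prop := ∀ (route : List (String × List String)) (query : String), Dom_apply_query_routing_py route query → Pre_apply_query_routing_py route query → Spec_apply_query_routing_py route query (apply_query_routing_py route query)


-- ===== LEMMAS AND PROOFS =====

theorem pv_insert_zero (l : List String) (x : String) : PySem.List.insert l 0 x = x :: l := by
  simp [PySem.List.insert, PySem.List.sliceIndices]

theorem pvStage1_keys (q : String) (d : PySem.Dict String (List String)) :
    (pvStage1 q d).keys = d.keys := by
  unfold pvStage1
  split_ifs
  · cases h : d.get? "reasoner" with
    | none => rfl
    | some l =>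
      dsimp only
      split_ifs
      · rfl
      · exact PySem.Dict.keys_insert_of_contains d _
          (by rw [PySem.Dict.contains_eq_isSome_get?, h]; rfl)
  · rfl

theorem pvStage2_keys (q : String) (d : PySem.Dict String (List String)) :
    (pvStage2 q d).keys = d.keys := by
  unfold pvStage2
  split_ifs
  · cases h : d.get? "reasoner" with
    | none => rfl
    | some l =>
      dsimp only
      split_ifs
      · rfl
      · exact PySem.Dict.keys_insert_of_contains d _
          (by rw [PySem.Dict.contains_eq_isSome_get?, h]; rfl)
  · rfl

theorem pvStage3_keys (q : String) (d : PySem.Dict String (List String)) :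
    (pvStage3 q d).keys = d.keys := by
  unfold pvStage3
  split_ifs
  · cases h : d.get? "primary" with
    | none => rfl
    | some l =>
      dsimp only
      split_ifs
      · rfl
      · exact PySem.Dict.keys_insert_of_contains d _
          (by rw [PySem.Dict.contains_eq_isSome_get?, h]; rfl)
  · rfl

theorem pvStage1_getD_ne (q : String) (d : PySem.Dict String (List String)) {k : String}
    (hk : k ≠ "reasoner") : (pvStage1 q d).getD k [] = d.getD k [] := by
  unfold pvStage1
  split_ifs
  · cases h : d.get? "reasoner" with
    | none => rfl
    | some l =>
      dsimp only
      split_ifs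
      · rfl
      · exact PySem.Dict.getD_insert_of_ne d _ _ hk
  · rfl

theorem pvStage2_getD_ne (q : String) (d : PySem.Dict String (List String)) {k : String}
    (hk : k ≠ "reasoner") : (pvStage2 q d).getD k [] = d.getD k [] := by
  unfold pvStage2
  split_ifs
  · cases h : d.get? "reasoner" with
    | none => rfl
    | some l =>
      dsimp only
      split_ifs
      · rfl
      · exact PySem.Dict.getD_insert_of_ne d _ _ hk
  · rfl

theorem pvStage3_getD_ne (q : String) (d : PySem.Dict String (List String)) {k : String}
    (hk : k ≠ "primary") : (pvStage3 q d).getD k [] = d.getD k [] := by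
  unfold pvStage3
  split_ifs
  · cases h : d.get? "primary" with
    | none => rfl
    | some l =>
      dsimp only
      split_ifs
      · rfl
      · exact PySem.Dict.getD_insert_of_ne d _ _ hk
  · rfl

theorem pvStage1_getD_r (q : String) (d : PySem.Dict String (List String))
    (h : d.contains "reasoner" = true) :
    (pvStage1 q d).getD "reasoner" [] =
      (if (["report", "generate report", "structured", "impression"].any (fun w => PySem.Str.isIn w q))
           && !((d.getD "reasoner" []).contains "medix_r1_30b") then ["medix_r1_30b"] else [])
        ++ d.getD "reasoner" [] := by
  obtain ⟨l, hl⟩ : ∃ l, d.get? "reasoner" = some l := by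
    rw [PySem.Dict.contains_eq_isSome_get?] at h
    exact Option.isSome_iff_exists.mp h
  have hgd : d.getD "reasoner" [] = l := PySem.Dict.getD_of_get?_eq_some d [] hl
  unfold pvStage1
  rw [hgd, hl]
  dsimp only
  by_cases hc : (["report", "generate report", "structured", "impression"].any (fun w => PySem.Str.isIn w q)) = true
  · rw [if_pos hc]
    by_cases hm : l.contains "medix_r1_30b" = true
    · rw [if_pos hm, hgd, hc, hm]; simp
    · rw [if_neg hm, Bool.not_eq_true] at *
      rw [pv_insert_zero, PySem.Dict.getD_insert_self, hc, hm]; simp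
  · rw [if_neg hc, Bool.not_eq_true] at *
    rw [hgd, hc]; simp

theorem pvStage2_getD_r (q : String) (d : PySem.Dict String (List String))
    (h : d.contains "reasoner" = true) :
    (pvStage2 q d).getD "reasoner" [] =
      d.getD "reasoner" []
        ++ (if (["differential", "diagnos", "classify"].any (fun w => PySem.Str.isIn w q))
               && !((d.getD "reasoner" []).contains "medix_r1_8b") then ["medix_r1_8b"] else []) := by
  obtain ⟨l, hl⟩ : ∃ l, d.get? "reasoner" = some l := by
    rw [PySem.Dict.contains_eq_isSome_get?] at h
    exact Option.isSome_iff_exists.mp h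
  have hgd : d.getD "reasoner" [] = l := PySem.Dict.getD_of_get?_eq_some d [] hl
  unfold pvStage2
  rw [hgd, hl]
  dsimp only
  by_cases hc : (["differential", "diagnos", "classify"].any (fun w => PySem.Str.isIn w q)) = true
  · rw [if_pos hc]
    by_cases hm : l.contains "medix_r1_8b" = true
    · rw [if_pos hm, hgd, hc, hm]; simp
    · rw [if_neg hm, Bool.not_eq_true] at *
      rw [PySem.Dict.getD_insert_self, hc, hm]; simp
  · rw [if_neg hc, Bool.not_eq_true] at *
    rw [hgd, hc]; simp

theorem pvStage3_getD_p (q : String) (d : PySem.Dict String (List String))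
    (h : d.contains "primary" = true) :
    (pvStage3 q d).getD "primary" [] =
      d.getD "primary" []
        ++ (if (["compare", "prior", "change", "progression"].any (fun w => PySem.Str.isIn w q))
               && !((d.getD "primary" []).contains "hulu_med_7b") then ["hulu_med_7b"] else []) := by
  obtain ⟨l, hl⟩ : ∃ l, d.get? "primary" = some l := by
    rw [PySem.Dict.contains_eq_isSome_get?] at h
    exact Option.isSome_iff_exists.mp h
  have hgd : d.getD "primary" [] = l := PySem.Dict.getD_of_get?_eq_some d [] hl
  unfold pvStage3
  rw [hgd, hl]
  dsimp only
  by_cases hc : (["compare", "prior", "change", "progression"].any (fun w => PySem.Str.isIn w q)) = true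
  · rw [if_pos hc]
    by_cases hm : l.contains "hulu_med_7b" = true
    · rw [if_pos hm, hgd, hc, hm]; simp
    · rw [if_neg hm, Bool.not_eq_true] at *
      rw [PySem.Dict.getD_insert_self, hc, hm]; simp
  · rw [if_neg hc, Bool.not_eq_true] at *
    rw [hgd, hc]; simp

-- ===== VERDICT (by name: the statement is the Claim_ definition above) =====
theorem apply_query_routing_py_spec : Claim_equal_apply_query_routing_py := by
  intro route query _ hpre
  obtain ⟨hnd, -, -⟩ := hpre
  unfold Spec_apply_query_routing_py
  simp only [apply_query_routing_py, apply_query_routing_py_alt]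
  set q := PySem.Str.lower query with hq
  set d0 : PySem.Dict String (List String) := PySem.Dict.mk route with hd0
  have hk0 : d0.keys = route.map Prod.fst := PySem.Dict.keys_mk route
  have hnd0 : d0.keys.Nodup := by rw [hk0]; exact hnd
  set dF := pvStage3 q (pvStage2 q (pvStage1 q d0)) with hdF
  have hkeys : dF.keys = d0.keys := by
    rw [hdF, pvStage3_keys, pvStage2_keys, pvStage1_keys]
  have hndF : dF.keys.Nodup := by rw [hkeys]; exact hnd0
  rw [PySem.Dict.items_eq_map_keys dF hndF [], hkeys,
    show route = d0.items from rfl, PySem.Dict.items_eq_map_keys d0 hnd0 [], List.map_map]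
  apply List.map_congr_left
  intro k hkmem
  simp only [Function.comp]
  congr 1
  have hc1 : (pvStage1 q d0).contains "reasoner" = d0.contains "reasoner" := by
    rw [PySem.Dict.contains_eq_decide_mem_keys, PySem.Dict.contains_eq_decide_mem_keys,
      pvStage1_keys]
  have hc12 : (pvStage2 q (pvStage1 q d0)).contains "primary" = d0.contains "primary" := by
    rw [PySem.Dict.contains_eq_decide_mem_keys, PySem.Dict.contains_eq_decide_mem_keys,
      pvStage2_keys, pvStage1_keys]
  have hne_rp : ("reasoner" : String) ≠ "primary" := by decide
  by_cases hkr : k = "reasoner"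
  · subst hkr
    have hcont : d0.contains "reasoner" = true :=
      (PySem.Dict.contains_iff_mem_keys d0 _).mpr hkmem
    have hcont1 : (pvStage1 q d0).contains "reasoner" = true := by rw [hc1]; exact hcont
    rw [hdF, pvStage3_getD_ne q (pvStage2 q (pvStage1 q d0)) hne_rp,
      pvStage2_getD_r q (pvStage1 q d0) hcont1, pvStage1_getD_r q d0 hcont]
    -- possibly prepending "medix_r1_30b" does not change membership of "medix_r1_8b"
    have h8 : ∀ b : Bool, (((if b then ["medix_r1_30b"] else []) ++ d0.getD "reasoner" []).contains
        "medix_r1_8b") = (d0.getD "reasoner" []).contains "medix_r1_8b" := by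
      intro b; cases b <;> simp
    rw [h8]
    simp [pvAdjusted, List.append_assoc]
  · by_cases hkp : k = "primary"
    · subst hkp
      have hcont : d0.contains "primary" = true :=
        (PySem.Dict.contains_iff_mem_keys d0 _).mpr hkmem
      have hcont12 : (pvStage2 q (pvStage1 q d0)).contains "primary" = true := by
        rw [hc12]; exact hcont
      have h12 : (pvStage2 q (pvStage1 q d0)).getD "primary" [] = d0.getD "primary" [] := by
        rw [pvStage2_getD_ne q (pvStage1 q d0) hne_rp.symm, pvStage1_getD_ne q d0 hne_rp.symm]
      rw [hdF, pvStage3_getD_p q (pvStage2 q (pvStage1 q d0)) hcont12, h12]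
      simp [pvAdjusted]
    · rw [hdF, pvStage3_getD_ne q _ hkp, pvStage2_getD_ne q _ hkr, pvStage1_getD_ne q _ hkr]
      simp [pvAdjusted, hkr, hkp]
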